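-- pv_equiv track=rewrite | github.com/WooHyunKing/CodingTest_study | Stack/programmers_hamburger.py | solution
-- ===== SOURCE A (Python) =====
-- def solution(ingredient):
--     answer = 0
--
--     # 빵 – 야채 – 고기 - 빵
--     # 1 - 2 - 3 - 1
--     # 빵(1) / 야채(2) / 고기(3)
--
--     stack = []
--
--     for i in ingredient:
--
--         if len(stack) < 3:
--             stack.append(i)
--             continue
--
--         if stack[-3:] == [1,2,3] and i == 1:
--             for _ in range(3):
--                 stack.pop()
--             answer += 1
--         else:
--             stack.append(i)
--
--     return answer
-- ===== SOURCE B (Python) =====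
-- def solution(ingredient):
--     # Repeated leftmost-pattern removal instead of A's single stack sweep.
--     items = list(ingredient)
--     answer = 0
--     while True:
--         for i in range(len(items) - 3):
--             if items[i:i+4] == [1, 2, 3, 1]:
--                 del items[i:i+4]
--                 answer += 1
--                 break
--         else:
--             return answer
-- ===== Notes on version B (the rewrite author's own statement) =====
-- stated objective: alternative
-- what changed: Replaces A's single left-to-right stack sweep with repeated removal of the leftmost contiguous [1,2,3,1] window from a copy of the list, rescanning from the start after each removal and counting removals.
import Mathlib
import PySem

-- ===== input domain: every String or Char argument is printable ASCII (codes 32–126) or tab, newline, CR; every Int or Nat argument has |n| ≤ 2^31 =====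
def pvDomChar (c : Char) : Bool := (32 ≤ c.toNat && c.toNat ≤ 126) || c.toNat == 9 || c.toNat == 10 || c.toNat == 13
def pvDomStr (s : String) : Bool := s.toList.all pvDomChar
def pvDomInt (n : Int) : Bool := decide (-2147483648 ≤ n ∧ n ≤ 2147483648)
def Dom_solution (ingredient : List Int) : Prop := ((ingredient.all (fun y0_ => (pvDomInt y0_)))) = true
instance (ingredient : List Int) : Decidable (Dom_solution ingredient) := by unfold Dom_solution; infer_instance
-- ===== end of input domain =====

-- B replaces A's single left-to-right stack sweep by repeated leftmost removal of the
-- contiguous window [1,2,3,1] with a rescan from the start (objective: alternative).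

-- ===== PORT A =====
-- one iteration of A's for-loop body on the state (stack, answer)
def aStep (st : List Int × Int) (i : Int) : List Int × Int :=
  if st.1.length < 3 then (st.1 ++ [i], st.2)
  else if PySem.List.slice st.1 (some (-3)) none = [1, 2, 3] ∧ i = 1 then
    (st.1.dropLast.dropLast.dropLast, st.2 + 1)
  else (st.1 ++ [i], st.2)

def solution (ingredient : List Int) : Int :=
  (ingredient.foldl aStep ([], 0)).2

-- ===== PORT B =====
-- B's inner for-loop: scan from the left for the first window items[i:i+4] == [1,2,3,1];
-- returns the part before the window and the part after it.
def findPat : List Int → Option (List Int × List Int)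
  | [] => none
  | x :: rest =>
    if (x :: rest).take 4 = [1, 2, 3, 1] then some ([], (x :: rest).drop 4)
    else match findPat rest with
      | some (u, v) => some (x :: u, v)
      | none => none

theorem findPat_length : ∀ {xs u v : List Int}, findPat xs = some (u, v) →
    u.length + 4 + v.length = xs.length := by
  intro xs
  induction xs with
  | nil => intro u v h; simp [findPat] at h
  | cons x rest ih =>
    intro u v h
    simp only [findPat] at h
    split at h
    · next htake =>
      have hlen : min 4 (x :: rest).length = 4 := by
        have := congrArg List.length htake
        rwa [List.length_take] at this
      simp only [Option.some.injEq, Prod.mk.injEq] at h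
      obtain ⟨hu, hv⟩ := h
      subst hu hv
      simp only [List.length_nil, List.length_drop]
      omega
    · revert h
      cases hrec : findPat rest with
      | none => intro h; simp at h
      | some p =>
        obtain ⟨u', v'⟩ := p
        intro h
        simp only [Option.some.injEq, Prod.mk.injEq] at h
        obtain ⟨hu, hv⟩ := h
        subst hv
        have := ih hrec
        subst hu
        simp only [List.length_cons]
        omega

-- B's outer while-loop: remove the found window, count it, rescan from the start.
def altGo (items : List Int) (answer : Int) : Int :=
  match h : findPat items with
  | some (u, v) => altGo (u ++ v) (answer + 1)
  | none => answer
termination_by items.length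
decreasing_by
  have := findPat_length h
  simp
  omega

def solution_alt (ingredient : List Int) : Int :=
  altGo ingredient 0

-- ===== PRECONDITION & SPEC =====
def Spec_solution (ingredient : List Int) (out : Int) : Prop := out = solution_alt ingredient
instance (ingredient : List Int) (out : Int) : Decidable (Spec_solution ingredient out) := by unfold Spec_solution; infer_instance

-- ===== CLAIM (what is proved, stated in full; the proofs are below) =====
def Claim_equal_solution : Prop := ∀ (ingredient : List Int), Dom_solution ingredient → Spec_solution ingredient (solution ingredient)

-- ===== LEMMAS AND PROOFS =====

theorem altGo_none {items : List Int} (h : findPat items = none) (a : Int) :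
    altGo items a = a := by
  rw [altGo]
  split
  · next heq => rw [h] at heq; cases heq
  · rfl

theorem altGo_some {items u v : List Int} (h : findPat items = some (u, v)) (a : Int) :
    altGo items a = altGo (u ++ v) (a + 1) := by
  rw [altGo]
  split
  · next u' v' heq =>
    rw [h] at heq
    simp only [Option.some.injEq, Prod.mk.injEq] at heq
    obtain ⟨rfl, rfl⟩ := heq
    rfl
  · next heq => rw [h] at heq; cases heq

theorem findPat_none : ∀ {xs : List Int}, findPat xs = none →
    ¬ [1, 2, 3, 1] <:+: xs := by
  intro xs
  induction xs with
  | nil => intro _ hinf; have := hinf.length_le; simp at this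
  | cons x rest ih =>
    intro h hinf
    simp only [findPat] at h
    split at h
    · cases h
    · next htake =>
      rcases List.infix_cons_iff.mp hinf with hp | hi
      · have := List.prefix_iff_eq_take.mp hp
        simp only [List.length_cons, List.length_nil] at this
        exact htake this.symm
      · cases hrec : findPat rest with
        | some p => rw [hrec] at h; obtain ⟨u', v'⟩ := p; cases h
        | none => exact ih hrec hi

theorem findPat_some_split : ∀ {xs u v : List Int}, findPat xs = some (u, v) →
    xs = u ++ ([1, 2, 3, 1] ++ v) := by
  intro xs
  induction xs with
  | nil => intro u v h; simp [findPat] at h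
  | cons x rest ih =>
    intro u v h
    simp only [findPat] at h
    split at h
    · next htake =>
      simp only [Option.some.injEq, Prod.mk.injEq] at h
      obtain ⟨rfl, rfl⟩ := h.symm
      conv_lhs => rw [← List.take_append_drop 4 (x :: rest), htake]
      simp
    · cases hrec : findPat rest with
      | some p =>
        obtain ⟨u', v'⟩ := p
        rw [hrec] at h
        simp only [Option.some.injEq, Prod.mk.injEq] at h
        obtain ⟨rfl, rfl⟩ := h.symm
        simp [ih hrec]
      | none => rw [hrec] at h; cases h

theorem findPat_some_leftmost : ∀ {xs u v : List Int}, findPat xs = some (u, v) →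
    ¬ [1, 2, 3, 1] <:+: (u ++ [1, 2, 3]) := by
  intro xs
  induction xs with
  | nil => intro u v h; simp [findPat] at h
  | cons x rest ih =>
    intro u v h
    simp only [findPat] at h
    split at h
    · next htake =>
      simp only [Option.some.injEq, Prod.mk.injEq] at h
      obtain ⟨rfl, rfl⟩ := h.symm
      intro hinf
      have := hinf.length_le
      simp at this
    · next htake =>
      cases hrec : findPat rest with
      | some p =>
        obtain ⟨u', v'⟩ := p
        rw [hrec] at h
        simp only [Option.some.injEq, Prod.mk.injEq] at h
        obtain ⟨rfl, rfl⟩ := h.symm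
        intro hinf
        rcases List.infix_cons_iff.mp hinf with hp | hi
        · -- a prefix match would make the window start at index 0 of x :: rest
          have hsplit := findPat_some_split hrec
          have hq : x :: (u' ++ [1, 2, 3]) <+: x :: rest :=
            ⟨1 :: v', by rw [hsplit]; simp⟩
          have := List.prefix_iff_eq_take.mp (hp.trans hq)
          simp only [List.length_cons, List.length_nil] at this
          exact htake this.symm
        · exact ih hrec hi
      | none => rw [hrec] at h; cases h

theorem aStep_shift (s : List Int) (a x : Int) :
    aStep (s, a) x = ((aStep (s, 0) x).1, a + (aStep (s, 0) x).2) := by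
  unfold aStep
  split_ifs <;> simp

theorem foldl_shift (v : List Int) : ∀ (s : List Int) (a : Int),
    v.foldl aStep (s, a) = ((v.foldl aStep (s, 0)).1, a + (v.foldl aStep (s, 0)).2) := by
  induction v with
  | nil => intro s a; simp
  | cons x v ih =>
    intro s a
    simp only [List.foldl_cons]
    rcases h1 : aStep (s, 0) x with ⟨st1, d⟩
    rw [aStep_shift s a x, h1, ih st1 (a + d), ih st1 d]
    simp [add_assoc]

theorem nopop (u : List Int) (a : Int) (h : ¬ [1, 2, 3, 1] <:+: u) :
    u.foldl aStep ([], a) = (u, a) := by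
  induction u using List.reverseRecOn with
  | nil => simp
  | append_singleton w x ih =>
    have hw : ¬ [1, 2, 3, 1] <:+: w :=
      fun hc => h (hc.trans (List.prefix_append w [x]).isInfix)
    rw [List.foldl_append, ih hw]
    simp only [List.foldl_cons, List.foldl_nil]
    unfold aStep
    split_ifs with h1 h2
    · rfl
    · exfalso
      obtain ⟨hs, hx⟩ := h2
      simp only at hs hx
      rw [PySem.List.slice_from_neg_ofNat w 3 (by omega)] at hs
      apply h
      refine ⟨w.take (w.length - 3), [], ?_⟩
      rw [hx]
      conv_rhs => rw [← List.take_append_drop (w.length - 3) w, hs]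
      simp
    · rfl

theorem main_step (u v : List Int) (h : ¬ [1, 2, 3, 1] <:+: (u ++ [1, 2, 3])) :
    ((u ++ ([1, 2, 3, 1] ++ v)).foldl aStep ([], 0)).2
      = ((u ++ v).foldl aStep ([], 0)).2 + 1 := by
  have hu : ¬ [1, 2, 3, 1] <:+: u :=
    fun hc => h (hc.trans (List.prefix_append u [1, 2, 3]).isInfix)
  have s1 : aStep (u, 0) 1 = (u ++ [1], 0) := by
    unfold aStep
    split_ifs with h1 h2
    · rfl
    · exfalso
      obtain ⟨hs, -⟩ := h2
      simp only at hs h1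
      rw [PySem.List.slice_from_neg_ofNat u 3 (by omega)] at hs
      apply h
      refine ⟨u.take (u.length - 3), [2, 3], ?_⟩
      conv_rhs => rw [← List.take_append_drop (u.length - 3) u, hs]
      simp
    · rfl
  have s2 : aStep (u ++ [1], 0) 2 = (u ++ [1, 2], 0) := by
    unfold aStep
    split_ifs with h1 h2
    · simp
    · exact absurd h2.2 (by norm_num)
    · simp
  have s3 : aStep (u ++ [1, 2], 0) 3 = (u ++ [1, 2, 3], 0) := by
    unfold aStep
    split_ifs with h1 h2
    · simp
    · exact absurd h2.2 (by norm_num)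
    · simp
  have s4 : aStep (u ++ [1, 2, 3], 0) 1 = (u, 1) := by
    unfold aStep
    split_ifs with h1 h2
    · exfalso; simp at h1
    · simp
    · exfalso
      apply h2
      refine ⟨?_, rfl⟩
      simp only
      rw [PySem.List.slice_from_neg_ofNat _ 3 (by omega)]
      simp
  rw [List.foldl_append, nopop u 0 hu]
  conv_rhs => rw [List.foldl_append, nopop u 0 hu]
  show (List.foldl aStep (aStep (aStep (aStep (aStep (u, 0) 1) 2) 3) 1) v).2
      = (List.foldl aStep (u, 0) v).2 + 1
  rw [s1, s2, s3, s4, foldl_shift v u 1]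
  omega

theorem altGo_shift : ∀ (items : List Int) (a : Int), altGo items a = a + altGo items 0 := by
  suffices H : ∀ (n : Nat) (items : List Int), items.length = n →
      ∀ a, altGo items a = a + altGo items 0 by
    exact fun items a => H items.length items rfl a
  intro n
  induction n using Nat.strong_induction_on with
  | _ n ih =>
    intro items hlen a
    cases hf : findPat items with
    | none => rw [altGo_none hf, altGo_none hf]; omega
    | some p =>
      obtain ⟨u, v⟩ := p
      rw [altGo_some hf a, altGo_some hf 0]
      have hl := findPat_length hf
      have h1 := ih (u ++ v).length (by simp; omega) (u ++ v) rfl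
      rw [h1 (a + 1), h1 (0 + 1)]
      omega

theorem sol_eq : ∀ (xs : List Int), solution xs = solution_alt xs := by
  suffices H : ∀ (n : Nat) (xs : List Int), xs.length = n → solution xs = solution_alt xs by
    exact fun xs => H xs.length xs rfl
  intro n
  induction n using Nat.strong_induction_on with
  | _ n ih =>
    intro xs hlen
    unfold solution solution_alt
    cases hf : findPat xs with
    | none =>
      rw [altGo_none hf, nopop xs 0 (findPat_none hf)]
    | some p =>
      obtain ⟨u, v⟩ := p
      have hl := findPat_length hf
      rw [altGo_some hf 0, altGo_shift (u ++ v) (0 + 1)]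
      rw [findPat_some_split hf, main_step u v (findPat_some_leftmost hf)]
      have := ih (u ++ v).length (by simp; omega) (u ++ v) rfl
      unfold solution solution_alt at this
      omega

-- ===== VERDICT (by name: the statement is the Claim_ definition above) =====
theorem solution_spec : Claim_equal_solution := by
  intro ingredient _
  unfold Spec_solution
  exact sol_eq ingredient
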